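-- pv_equiv track=rewrite | github.com/arnaudlorin/AOC2023 | 18/18bis.py | surface_one_line
-- ===== SOURCE A (Python) =====
-- def surface_one_line(list_vert,i):
--     ncross=0
--     z=0
--     ninside=0
--     for j in list_vert:
--         if i>j[1] and i<j[2]:
--             if ncross==1:
--                 ninside+=j[0]-z+1
--                 ncross=0
--             else:
--                 z=j[0]
--                 ncross=1
--     return ninside
-- ===== SOURCE B (Python) =====
-- def surface_one_line(list_vert, i):
--     xs = [j[0] for j in list_vert if j[1] < i < j[2]]
--     hi = xs[1::2]                  # right edge of each interval
--     lo = xs[::2][:len(hi)]         # matching left edges (lone trailing crossing dropped)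
--     return sum(hi) - sum(lo) + len(hi)
-- ===== Notes on version B (the rewrite author's own statement) =====
-- stated objective: simpler
-- what changed: Replaces A's per-segment parity-toggle state machine that accumulates each interval's width by the linearity identity sum(b_k - a_k + 1) = sum(odd-position crossings) - sum(even-position crossings) + number of intervals: B computes three whole-list aggregates over the crossing coordinates and never forms any pair or carries any toggle/last-edge state.
import Mathlib
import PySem

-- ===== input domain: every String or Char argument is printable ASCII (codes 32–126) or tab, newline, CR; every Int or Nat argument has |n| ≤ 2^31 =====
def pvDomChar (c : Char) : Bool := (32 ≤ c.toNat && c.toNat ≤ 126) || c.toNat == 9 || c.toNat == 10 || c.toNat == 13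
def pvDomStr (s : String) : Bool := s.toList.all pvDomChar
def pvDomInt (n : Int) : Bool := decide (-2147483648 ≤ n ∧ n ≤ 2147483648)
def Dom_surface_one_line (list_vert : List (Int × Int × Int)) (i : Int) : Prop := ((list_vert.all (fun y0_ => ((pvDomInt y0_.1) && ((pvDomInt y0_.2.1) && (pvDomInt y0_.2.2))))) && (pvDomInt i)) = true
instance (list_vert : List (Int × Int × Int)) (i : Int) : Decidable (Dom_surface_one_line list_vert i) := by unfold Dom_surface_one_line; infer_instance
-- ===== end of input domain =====

-- ===== PORT A =====
-- B replaces A's parity-toggle state machine by three whole-list aggregates (linearity identity); return value proved equal.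
def surface_one_line (list_vert : List (Int × Int × Int)) (i : Int) : Int :=
  (list_vert.foldl
    (fun (st : Int × Int × Int) j =>
      if i > j.2.1 ∧ i < j.2.2 then
        if st.1 == 1 then (0, st.2.1, st.2.2 + (j.1 - st.2.1 + 1))
        else (1, j.1, st.2.2)
      else st)
    (0, 0, 0)).2.2

-- ===== PORT B =====
-- xs[::2] / xs[1::2] (step-2 slices) ported by hand; exact for nonnegative step-2 slices from the start.
def pvEveryOther : List Int → List Int
  | [] => []
  | [a] => [a]
  | a :: _ :: t => a :: pvEveryOther t

def surface_one_line_alt (list_vert : List (Int × Int × Int)) (i : Int) : Int :=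
  let xs := (list_vert.filter (fun j => decide (j.2.1 < i) && decide (i < j.2.2))).map (fun j => j.1)
  let hi := pvEveryOther xs.tail
  let lo := (pvEveryOther xs).take hi.length
  hi.sum - lo.sum + hi.length

-- ===== PRECONDITION & SPEC =====
def Spec_surface_one_line (list_vert : List (Int × Int × Int)) (i : Int) (out : Int) : Prop := out = surface_one_line_alt list_vert i
instance (list_vert : List (Int × Int × Int)) (i : Int) (out : Int) : Decidable (Spec_surface_one_line list_vert i out) := by unfold Spec_surface_one_line; infer_instance

-- ===== CLAIM (what is proved, stated in full; the proofs are below) =====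
def Claim_equal_surface_one_line : Prop := ∀ (list_vert : List (Int × Int × Int)) (i : Int), Dom_surface_one_line list_vert i → Spec_surface_one_line list_vert i (surface_one_line list_vert i)

-- ===== LEMMAS AND PROOFS =====

-- the interval widths A's toggle accumulates, as a pairwise sum over the crossing list
def pvZS (xs : List Int) : Int :=
  match xs with
  | [] => 0
  | [_] => 0
  | a :: b :: t => (b - a + 1) + pvZS t

lemma pvEveryOther_cons (a : Int) (t : List Int) :
    pvEveryOther (a :: t) = a :: pvEveryOther t.tail := by
  cases t <;> simp [pvEveryOther]

-- the toggle step on an already-filtered crossing coordinate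
def pvStep (st : Int × Int × Int) (x : Int) : Int × Int × Int :=
  if st.1 == 1 then (0, st.2.1, st.2.2 + (x - st.2.1 + 1))
  else (1, x, st.2.2)

lemma pvToggle (xs : List Int) :
    (∀ z n, (xs.foldl pvStep (0, z, n)).2.2 = n + pvZS xs) ∧
    (∀ z n, (xs.foldl pvStep (1, z, n)).2.2 =
        n + (match xs with | [] => 0 | a :: t => (a - z + 1) + pvZS t)) := by
  induction xs with
  | nil => simp [pvZS]
  | cons a t ih =>
    constructor
    · intro z n
      have h1 := ih.2 a n
      simp only [List.foldl]
      rw [show pvStep (0, z, n) a = (1, a, n) from rfl, h1]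
      cases t with
      | nil => simp [pvZS]
      | cons b t' => simp [pvZS]
    · intro z n
      have h0 := ih.1 z (n + (a - z + 1))
      simp only [List.foldl]
      rw [show pvStep (1, z, n) a = (0, z, n + (a - z + 1)) from rfl, h0]
      ring

-- A's fold over list_vert equals the toggle fold over the filtered crossing coordinates.
lemma pvFilterFold (i : Int) (l : List (Int × Int × Int)) (st : Int × Int × Int) :
    l.foldl
      (fun (st : Int × Int × Int) j =>
        if i > j.2.1 ∧ i < j.2.2 then
          if st.1 == 1 then (0, st.2.1, st.2.2 + (j.1 - st.2.1 + 1))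
          else (1, j.1, st.2.2)
        else st) st
    = ((l.filter (fun j => decide (j.2.1 < i) && decide (i < j.2.2))).map (fun j => j.1)).foldl pvStep st := by
  induction l generalizing st with
  | nil => rfl
  | cons j t ih =>
    by_cases h : j.2.1 < i ∧ i < j.2.2
    · simp only [List.foldl, List.filter]
      rw [if_pos ⟨h.1, h.2⟩]
      have : (decide (j.2.1 < i) && decide (i < j.2.2)) = true := by simp [h.1, h.2]
      rw [this]
      simp only [List.map, List.foldl]
      rw [ih]
      rfl
    · simp only [List.foldl, List.filter]
      rw [if_neg (by exact fun ⟨h1, h2⟩ => h ⟨h1, h2⟩)]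
      have : (decide (j.2.1 < i) && decide (i < j.2.2)) = false := by
        rcases not_and_or.mp h with h1 | h1 <;> simp [h1]
      rw [this]
      exact ih st

-- the pairwise width sum equals B's aggregate formula (linearity / telescoping)
lemma pvZS_eq_aggregates : ∀ (xs : List Int),
    pvZS xs = (pvEveryOther xs.tail).sum
      - ((pvEveryOther xs).take (pvEveryOther xs.tail).length).sum
      + (pvEveryOther xs.tail).length
  | [] => by simp [pvZS, pvEveryOther]
  | [a] => by simp [pvZS, pvEveryOther]
  | a :: b :: t => by
    have ih := pvZS_eq_aggregates t
    simp only [pvZS, List.tail]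
    rw [pvEveryOther_cons b t]
    show (b - a + 1) + pvZS t =
      (b :: pvEveryOther t.tail).sum
        - ((a :: pvEveryOther t).take (b :: pvEveryOther t.tail).length).sum
        + ((b :: pvEveryOther t.tail).length : Int)
    simp only [List.length_cons, List.take_succ_cons, List.sum_cons]
    rw [ih]
    push_cast
    ring

-- ===== VERDICT (by name: the statement is the Claim_ definition above) =====
theorem surface_one_line_spec : Claim_equal_surface_one_line := by
  intro list_vert i _
  unfold Spec_surface_one_line surface_one_line surface_one_line_alt
  rw [pvFilterFold, (pvToggle _).1 0 0, pvZS_eq_aggregates]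
  ring
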